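-- pv_equiv track=rewrite | github.com/julian-falco/DuplicateChecker | DuplicateTraceChecker.py | checkDuplicateTraces
-- ===== SOURCE A (Python) =====
-- def checkDuplicateTraces(traces):
--     """For a list of traces under the same object name and section, return indices of duplicates after first instance"""
--
--     # store the index of duplicate traces
--     duplicates = []
--
--     for i in range(len(traces)):
--         # skip traces that were already found to be duplicates
--         if not i in duplicates:
--             for j in range(i+1, len(traces)):
--                 if traces[j] == traces[i]:
--                     # if traces have the same list of coords, label it as a duplicate
--                     duplicates.append(j)
--
--     return duplicates
-- ===== SOURCE B (Python) =====
-- def checkDuplicateTraces(traces):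
--     """For a list of traces under the same object name and section, return indices of duplicates after first instance"""
--     # bucket indices by trace content (hashed), in first-occurrence order
--     occurrences = {}
--     for idx, trace in enumerate(traces):
--         occurrences.setdefault(tuple(trace), []).append(idx)
--     duplicates = []
--     for occ in occurrences.values():
--         duplicates.extend(occ[1:])
--     return duplicates
-- ===== Notes on version B (the rewrite author's own statement) =====
-- stated objective: alternative
-- what changed: Replaced A's nested index scans (for each index, rescan the whole suffix for equal traces, with a list-membership skip test) by a single pass that buckets indices in a dict keyed by trace content, then concatenates each bucket minus its first element in first-occurrence order.
import Mathlib
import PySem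

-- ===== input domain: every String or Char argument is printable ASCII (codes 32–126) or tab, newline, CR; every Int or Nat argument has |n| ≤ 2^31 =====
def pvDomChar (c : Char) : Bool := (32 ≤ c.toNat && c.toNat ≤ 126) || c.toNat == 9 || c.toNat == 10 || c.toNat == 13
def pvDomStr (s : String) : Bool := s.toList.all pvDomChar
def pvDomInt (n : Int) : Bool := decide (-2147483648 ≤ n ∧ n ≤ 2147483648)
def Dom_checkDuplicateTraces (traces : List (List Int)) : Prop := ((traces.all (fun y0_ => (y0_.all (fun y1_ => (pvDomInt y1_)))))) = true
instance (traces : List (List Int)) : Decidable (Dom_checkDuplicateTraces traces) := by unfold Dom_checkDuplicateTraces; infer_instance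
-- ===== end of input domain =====

-- B replaces A's nested index-by-index rescans with a single hash-bucketing pass
-- (indices grouped by trace, in first-occurrence order); objective: alternative.

-- ===== PORT A =====
def checkDuplicateTraces (traces : List (List Int)) : List Int :=
  (PySem.List.pyRange 0 (traces.length : Int) 1).foldl (fun duplicates i =>
    if i ∈ duplicates then duplicates
    else
      (PySem.List.pyRange (i + 1) (traces.length : Int) 1).foldl (fun d j =>
        if PySem.List.pyGetD traces j [] == PySem.List.pyGetD traces i [] then d ++ [j] else d)
        duplicates) []

-- ===== PORT B =====
def checkDuplicateTraces_alt (traces : List (List Int)) : List Int :=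
  let occurrences : PySem.Dict (List Int) (List Int) :=
    (PySem.List.enumerate traces 0).foldl
      (fun d p => d.modify p.2 [] (fun l => l ++ [p.1])) PySem.Dict.empty
  occurrences.values.foldl (fun duplicates occ => duplicates ++ occ.drop 1) []

-- ===== PRECONDITION & SPEC =====
def Spec_checkDuplicateTraces (traces : List (List Int)) (out : List Int) : Prop := out = checkDuplicateTraces_alt traces
instance (traces : List (List Int)) (out : List Int) : Decidable (Spec_checkDuplicateTraces traces out) := by unfold Spec_checkDuplicateTraces; infer_instance

-- ===== CLAIM (what is proved, stated in full; the proofs are below) =====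
def Claim_equal_checkDuplicateTraces : Prop := ∀ (traces : List (List Int)), Dom_checkDuplicateTraces traces → Spec_checkDuplicateTraces traces (checkDuplicateTraces traces)

-- ===== LEMMAS AND PROOFS =====

-- trace at index i (indices used are always in range)
def pvTr (traces : List (List Int)) (i : Int) : List Int := PySem.List.pyGetD traces i []

-- indices after i holding the same trace as i
def pvLater (traces : List (List Int)) (i : Int) : List Int :=
  (PySem.List.pyRange (i + 1) (traces.length : Int) 1).filter
    (fun j => pvTr traces j == pvTr traces i)

-- i is the first occurrence of its trace
def pvFirst (traces : List (List Int)) (i : Int) : Bool :=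
  (PySem.List.pyRange 0 i 1).all (fun j => !(pvTr traces j == pvTr traces i))

-- first-occurrence indices below k
def pvFirsts (traces : List (List Int)) (k : Int) : List Int :=
  (PySem.List.pyRange 0 k 1).filter (pvFirst traces)

-- A's accumulator after the outer loop has processed the indices below k
def pvD (traces : List (List Int)) (k : Int) : List Int :=
  (pvFirsts traces k).flatMap (pvLater traces)

-- A's outer-loop body
def pvStep (traces : List (List Int)) (dups : List Int) (i : Int) : List Int :=
  if i ∈ dups then dups
  else
    (PySem.List.pyRange (i + 1) (traces.length : Int) 1).foldl (fun d j =>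
      if PySem.List.pyGetD traces j [] == PySem.List.pyGetD traces i [] then d ++ [j] else d)
      dups

-- indices (ascending) holding trace c
def pvOcc (traces : List (List Int)) (c : List Int) : List Int :=
  (PySem.List.pyRange 0 (traces.length : Int) 1).filter (fun j => pvTr traces j == c)

lemma pvA_eq_foldl_step (traces : List (List Int)) :
    checkDuplicateTraces traces
      = (PySem.List.pyRange 0 (traces.length : Int) 1).foldl (pvStep traces) [] := rfl

lemma pvD_zero (traces : List (List Int)) : pvD traces 0 = [] := by
  simp [pvD, pvFirsts]

lemma pvMem_D_self (traces : List (List Int)) (k : Int) (_hk0 : 0 ≤ k)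
    (hkn : k < (traces.length : Int)) :
    (k ∈ pvD traces k) ↔ pvFirst traces k = false := by
  constructor
  · intro hk
    simp only [pvD, List.mem_flatMap, pvFirsts, List.mem_filter,
      PySem.List.mem_pyRange_one, pvLater] at hk
    obtain ⟨f, ⟨⟨hf0, hfk⟩, hffirst⟩, ⟨_, heq⟩⟩ := hk
    rw [beq_iff_eq] at heq
    rw [Bool.eq_false_iff]
    intro hall
    simp only [pvFirst, List.all_eq_true] at hall
    have := hall f (by simp [PySem.List.mem_pyRange_one, hf0, hfk])
    simp [heq] at this
  · intro hk
    have hex : ∃ m : Nat, (m : Int) < k ∧ pvTr traces (m : Int) = pvTr traces k := by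
      simp only [pvFirst] at hk
      rw [List.all_eq_false] at hk
      obtain ⟨j, hjmem, hj⟩ := hk
      rw [PySem.List.mem_pyRange_one] at hjmem
      refine ⟨j.toNat, by omega, ?_⟩
      have : (j.toNat : Int) = j := by omega
      rw [this]
      simpa [beq_iff_eq] using hj
    classical
    obtain ⟨hlt, heq⟩ := Nat.find_spec hex
    simp only [pvD, List.mem_flatMap, pvFirsts, List.mem_filter,
      PySem.List.mem_pyRange_one, pvLater]
    refine ⟨(Nat.find hex : Int), ⟨⟨by positivity, hlt⟩, ?_⟩, ⟨⟨by omega, hkn⟩, by simp [heq]⟩⟩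
    simp only [pvFirst, List.all_eq_true]
    intro j hj
    rw [PySem.List.mem_pyRange_one] at hj
    simp only [Bool.not_eq_eq_eq_not, Bool.not_true, beq_eq_false_iff_ne, ne_eq]
    intro hcon
    have hjn : (j.toNat : Int) = j := by omega
    have : ¬ ((j.toNat : Int) < k ∧ pvTr traces (j.toNat : Int) = pvTr traces k) :=
      Nat.find_min hex (by omega)
    apply this
    rw [hjn]
    exact ⟨by omega, hcon.trans heq⟩

lemma pvFirsts_succ (traces : List (List Int)) (k : Int) (hk0 : 0 ≤ k) :
    pvFirsts traces (k + 1)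
      = pvFirsts traces k ++ if pvFirst traces k then [k] else [] := by
  simp only [pvFirsts]
  rw [PySem.List.pyRange_one_succ_right hk0, List.filter_append]
  cases hf : pvFirst traces k <;> simp [List.filter, hf]

lemma pvStep_D (traces : List (List Int)) (k : Int) (hk0 : 0 ≤ k)
    (hkn : k < (traces.length : Int)) :
    pvStep traces (pvD traces k) k = pvD traces (k + 1) := by
  by_cases hf : pvFirst traces k = true
  · have hnot : k ∉ pvD traces k := by
      rw [pvMem_D_self traces k hk0 hkn, hf]; simp
    rw [pvStep, if_neg hnot, PySem.List.foldl_append_if_eq_filter]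
    simp only [pvD, pvFirsts_succ traces k hk0, hf, if_pos, List.flatMap_append]
    simp [pvLater, pvTr]
  · have hmem : k ∈ pvD traces k := by
      rw [pvMem_D_self traces k hk0 hkn]
      simpa using hf
    rw [pvStep, if_pos hmem]
    simp only [pvD, pvFirsts_succ traces k hk0, hf, List.flatMap_append]
    simp

lemma pvOuter (traces : List (List Int)) (m : Nat) :
    ∀ k : Int, 0 ≤ k → k + m = (traces.length : Int) →
    (PySem.List.pyRange k (traces.length : Int) 1).foldl (pvStep traces) (pvD traces k)
      = pvD traces (traces.length : Int) := by
  induction m with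
  | zero =>
    intro k hk0 hkn
    rw [PySem.List.pyRange_one_eq_nil (by omega)]
    simp only [List.foldl_nil]
    congr 1
    omega
  | succ m ih =>
    intro k hk0 hkn
    rw [PySem.List.pyRange_one_cons (by omega)]
    simp only [List.foldl_cons]
    rw [pvStep_D traces k hk0 (by omega)]
    exact ih (k + 1) (by omega) (by omega)

lemma pvOcc_first (traces : List (List Int)) (f : Int)
    (hf : f ∈ pvFirsts traces (traces.length : Int)) :
    pvOcc traces (pvTr traces f) = f :: pvLater traces f := by
  simp only [pvFirsts, List.mem_filter, PySem.List.mem_pyRange_one] at hf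
  obtain ⟨⟨hf0, hfn⟩, hfirst⟩ := hf
  simp only [pvFirst, List.all_eq_true] at hfirst
  rw [pvOcc, PySem.List.pyRange_one_append 0 f (traces.length : Int) hf0 (by omega),
    PySem.List.pyRange_one_cons hfn, List.filter_append, List.filter_cons]
  have h1 : (PySem.List.pyRange 0 f 1).filter (fun j => pvTr traces j == pvTr traces f) = [] := by
    rw [List.filter_eq_nil_iff]
    intro j hj
    simpa using hfirst j hj
  rw [h1]
  simp [pvLater]

lemma pvDedup_aux (traces : List (List Int)) (m : Nat) :
    PySem.Set.ofList ((PySem.List.pyRange 0 (m : Int) 1).map (pvTr traces))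
      = (pvFirsts traces (m : Int)).map (pvTr traces) := by
  induction m with
  | zero => simp [pvFirsts]
  | succ m ih =>
    have hm0 : (0 : Int) ≤ (m : Int) := by omega
    have hcast : ((m + 1 : Nat) : Int) = (m : Int) + 1 := by push_cast; ring
    rw [hcast, PySem.List.pyRange_one_succ_right hm0, List.map_append]
    simp only [List.map_cons, List.map_nil]
    rw [PySem.Set.ofList_append_singleton, ih, pvFirsts_succ traces (m : Int) hm0]
    by_cases hf : pvFirst traces (m : Int) = true
    · have hnot : pvTr traces (m : Int) ∉ (pvFirsts traces (m : Int)).map (pvTr traces) := by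
        intro hmem
        rw [← ih] at hmem
        rw [PySem.Set.mem_ofList, List.mem_map] at hmem
        obtain ⟨j, hj, hje⟩ := hmem
        simp only [pvFirst, List.all_eq_true] at hf
        have := hf j hj
        simp [hje] at this
      rw [PySem.Set.add_of_not_mem hnot, hf]
      simp
    · have hmem : pvTr traces (m : Int) ∈ (pvFirsts traces (m : Int)).map (pvTr traces) := by
        rw [← ih, PySem.Set.mem_ofList, List.mem_map]
        simp only [pvFirst] at hf
        rw [Bool.not_eq_true, List.all_eq_false] at hf
        obtain ⟨j, hj, hje⟩ := hf
        exact ⟨j, hj, by simpa using hje⟩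
      rw [PySem.Set.add_of_mem hmem]
      simp [Bool.eq_false_iff.mpr hf]

lemma pvDedup_eq_map_firsts (traces : List (List Int)) :
    PySem.List.dedup traces = (pvFirsts traces (traces.length : Int)).map (pvTr traces) := by
  have h := pvDedup_aux traces traces.length
  rw [PySem.List.dedup_eq_ofList]
  rw [← h]
  congr 1
  simpa [pvTr] using (PySem.List.map_pyGetD_pyRange_zero traces []).symm

lemma pvAlt_eq (traces : List (List Int)) :
    checkDuplicateTraces_alt traces
      = (PySem.List.dedup traces).flatMap (fun c => (pvOcc traces c).drop 1) := by
  unfold checkDuplicateTraces_alt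
  have hfold : (PySem.List.enumerate traces 0).foldl
      (fun d p => d.modify p.2 [] (fun l => l ++ [p.1])) PySem.Dict.empty
      = ((PySem.List.enumerate traces 0).map (fun p => (p.2, p.1))).foldl
          (fun d q => d.modify q.1 [] (fun l => l ++ [q.2])) PySem.Dict.empty := by
    rw [List.foldl_map]
  have hkeys : ((PySem.List.enumerate traces 0).foldl
      (fun d p => d.modify p.2 [] (fun l => l ++ [p.1])) PySem.Dict.empty).keys
      = PySem.List.dedup traces := by
    rw [PySem.Dict.keys_foldl_modify_key]
    simp [PySem.List.map_snd_enumerate, PySem.Set.update_nil_left]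
  have hnodup : ((PySem.List.enumerate traces 0).foldl
      (fun d p => d.modify p.2 [] (fun l => l ++ [p.1])) PySem.Dict.empty).keys.Nodup := by
    rw [hkeys]
    exact PySem.List.nodup_dedup traces
  have hval : ∀ c, ((PySem.List.enumerate traces 0).foldl
      (fun d p => d.modify p.2 [] (fun l => l ++ [p.1])) PySem.Dict.empty).getD c [] = pvOcc traces c := by
    intro c
    rw [hfold, PySem.Dict.getD_foldl_modify_append]
    rw [PySem.List.enumerate_eq_map_pyRange (d := [])]
    simp [List.filter_map, List.map_map, Function.comp_def, pvOcc, pvTr]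
  rw [PySem.List.foldl_append_eq_flatMap]
  rw [PySem.Dict.values_eq_map_keys _ hnodup []]
  rw [List.flatMap_map, hkeys]
  simp only [List.nil_append]
  apply List.flatMap_congr
  intro c _
  rw [hval c]

-- ===== VERDICT (by name: the statement is the Claim_ definition above) =====
theorem checkDuplicateTraces_spec : Claim_equal_checkDuplicateTraces := by
  intro traces _
  unfold Spec_checkDuplicateTraces
  rw [pvA_eq_foldl_step, pvAlt_eq, pvDedup_eq_map_firsts]
  have hA : (PySem.List.pyRange 0 (traces.length : Int) 1).foldl (pvStep traces) []
      = pvD traces (traces.length : Int) := by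
    have := pvOuter traces traces.length 0 le_rfl (by simp)
    simpa [pvD_zero] using this
  rw [hA, List.flatMap_map]
  unfold pvD
  apply List.flatMap_congr
  intro f hf
  rw [pvOcc_first traces f hf]
  rfl
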